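-- pv_equiv track=rewrite | github.com/horizon-research/hvs_vr_encoding | fpga/len_correction_hls/precomputation/generate_precompute_constants.py | get_insert_nums
-- ===== SOURCE A (Python) =====
-- def get_insert_nums(min_ys, max_ys):
--     insert_nums = []
--     max_y_in_buffer = -1
--     for i in range(len(min_ys)):
--         if max_y_in_buffer < max_ys[i]:
--             insert_nums.append(max_ys[i] - max_y_in_buffer)
--             max_y_in_buffer = max_ys[i]
--         else:
--             insert_nums.append(0)
--     return insert_nums
-- ===== SOURCE B (Python) =====
-- def get_insert_nums(min_ys, max_ys):
--     prefix = [-1]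
--     for i in range(len(min_ys)):
--         prefix.append(max(prefix[-1], max_ys[i]))
--     return [prefix[i + 1] - prefix[i] for i in range(len(min_ys))]
-- ===== Notes on version B (the rewrite author's own statement) =====
-- stated objective: alternative
-- what changed: Replaces A's single fused loop (running max kept in a mutable scalar, gap-or-zero appended per step) with a two-pass decomposition: first build an explicit prefix-maximum table seeded at -1, then return its adjacent differences.
import Mathlib
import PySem

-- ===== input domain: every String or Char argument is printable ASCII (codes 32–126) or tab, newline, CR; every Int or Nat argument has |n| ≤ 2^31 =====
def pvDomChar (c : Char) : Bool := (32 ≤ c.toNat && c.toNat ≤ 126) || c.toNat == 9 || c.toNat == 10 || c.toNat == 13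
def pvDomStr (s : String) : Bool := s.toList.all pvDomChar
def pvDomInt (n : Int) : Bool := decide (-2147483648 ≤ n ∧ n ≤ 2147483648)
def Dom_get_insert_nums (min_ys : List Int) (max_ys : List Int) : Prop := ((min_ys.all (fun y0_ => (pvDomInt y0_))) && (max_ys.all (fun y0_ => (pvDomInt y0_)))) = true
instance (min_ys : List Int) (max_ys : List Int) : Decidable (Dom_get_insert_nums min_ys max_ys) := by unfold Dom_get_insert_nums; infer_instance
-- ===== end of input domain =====

-- B replaces A's fused running-max loop by an explicit prefix-maximum table followed by an
-- adjacent-difference pass (same cost; a different two-pass decomposition).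


-- ===== PORT A =====
def get_insert_nums (min_ys : List Int) (max_ys : List Int) : List Int :=
  ((PySem.List.pyRange 0 min_ys.length 1).foldl
    (fun (st : List Int × Int) i =>
      let v := PySem.List.pyGetD max_ys i 0
      if st.2 < v then (st.1 ++ [v - st.2], v) else (st.1 ++ [(0 : Int)], st.2))
    (([] : List Int), (-1 : Int))).1

-- ===== PORT B =====
def get_insert_nums_alt (min_ys : List Int) (max_ys : List Int) : List Int :=
  let pfx := (PySem.List.pyRange 0 min_ys.length 1).foldl
    (fun (p : List Int) i =>
      p ++ [max (PySem.List.pyGetD p (-1) 0) (PySem.List.pyGetD max_ys i 0)])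
    [(-1 : Int)]
  (PySem.List.pyRange 0 min_ys.length 1).map
    (fun i => PySem.List.pyGetD pfx (i + 1) 0 - PySem.List.pyGetD pfx i 0)

-- ===== PRECONDITION & SPEC =====
-- Python A raises IndexError (max_ys[i]) iff max_ys is shorter than min_ys; exactly that is excluded.
def Pre_get_insert_nums (min_ys : List Int) (max_ys : List Int) : Prop :=
  min_ys.length ≤ max_ys.length
instance (min_ys : List Int) (max_ys : List Int) : Decidable (Pre_get_insert_nums min_ys max_ys) := by
  unfold Pre_get_insert_nums; infer_instance
def pvWitness_get_insert_nums : List Int × List Int := ([0, 0, 0], [3, 1, 5])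

def Spec_get_insert_nums (min_ys : List Int) (max_ys : List Int) (out : List Int) : Prop := out = get_insert_nums_alt min_ys max_ys
instance (min_ys : List Int) (max_ys : List Int) (out : List Int) : Decidable (Spec_get_insert_nums min_ys max_ys out) := by unfold Spec_get_insert_nums; infer_instance

-- ===== CLAIM (what is proved, stated in full; the proofs are below) =====
def Claim_equal_get_insert_nums : Prop := ∀ (min_ys : List Int) (max_ys : List Int), Dom_get_insert_nums min_ys max_ys → Pre_get_insert_nums min_ys max_ys → Spec_get_insert_nums min_ys max_ys (get_insert_nums min_ys max_ys)

-- ===== LEMMAS AND PROOFS =====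

/-- Running maxima of `vs` started from `m` (the tail of B's prefix table). -/
def pvScan (m : Int) : List Int → List Int
  | [] => []
  | v :: vs => max m v :: pvScan (max m v) vs

/-- The common value of both programs: per element, the increase of the running maximum. -/
def pvDiffs (m : Int) : List Int → List Int
  | [] => [] 
  | v :: vs => (max m v - m) :: pvDiffs (max m v) vs

lemma pvDiffs_length (m : Int) (vs : List Int) : (pvDiffs m vs).length = vs.length := by
  induction vs generalizing m with
  | nil => rfl
  | cons v vs ih => simp [pvDiffs, ih]

lemma foldA_eq (vs : List Int) (acc : List Int) (m : Int) :
    vs.foldl (fun (st : List Int × Int) v =>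
        if st.2 < v then (st.1 ++ [v - st.2], v) else (st.1 ++ [(0 : Int)], st.2)) (acc, m)
      = (acc ++ pvDiffs m vs, vs.foldl max m) := by
  induction vs generalizing acc m with
  | nil => simp [pvDiffs]
  | cons v vs ih =>
    simp only [List.foldl_cons]
    by_cases h : m < v
    · have hmax : max m v = v := max_eq_right (le_of_lt h)
      simp [h, ih, pvDiffs, hmax]
    · have hmax : max m v = m := max_eq_left (le_of_not_gt h)
      simp [h, ih, pvDiffs, hmax]

lemma foldP_eq (vs : List Int) (q : List Int) (m : Int) :
    vs.foldl (fun (p : List Int) v => p ++ [max (PySem.List.pyGetD p (-1) 0) v]) (q ++ [m])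
      = q ++ [m] ++ pvScan m vs := by
  induction vs generalizing q m with
  | nil => simp [pvScan]
  | cons v vs ih =>
    simp only [List.foldl_cons, PySem.List.pyGetD_neg_one_append_singleton]
    rw [List.append_assoc q [m] [max m v], ← List.append_assoc q, ih (q ++ [m]) (max m v)]
    simp [pvScan]

lemma pvScan_diff_getD (vs : List Int) (m : Int) (k : Nat) (hk : k < vs.length) :
    (m :: pvScan m vs).getD (k + 1) 0 - (m :: pvScan m vs).getD k 0
      = (pvDiffs m vs).getD k 0 := by
  induction vs generalizing m k with
  | nil => simp at hk
  | cons v vs ih =>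
    cases k with
    | zero => simp [pvScan, pvDiffs]
    | succ k =>
      have hk' : k < vs.length := by simpa using hk
      simpa [pvScan, pvDiffs] using ih (max m v) k hk'

-- ===== VERDICT (by name: the statement is the Claim_ definition above) =====
theorem get_insert_nums_spec : Claim_equal_get_insert_nums := by
  intro min_ys max_ys _ _
  unfold Spec_get_insert_nums get_insert_nums get_insert_nums_alt
  rw [PySem.List.pyRange_zero_nat]
  set n := min_ys.length with hn
  set g : Nat → Int := fun k => PySem.List.pyGetD max_ys (k : Int) 0 with hg
  set vs : List Int := (List.range n).map g with hvs
  have hlen : vs.length = n := by simp [hvs]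
  -- A's side
  have hA : ((List.range n).map (fun k => ((k : Nat) : Int))).foldl
      (fun (st : List Int × Int) i =>
        let v := PySem.List.pyGetD max_ys i 0
        if st.2 < v then (st.1 ++ [v - st.2], v) else (st.1 ++ [(0 : Int)], st.2))
      (([] : List Int), (-1 : Int))
      = ([] ++ pvDiffs (-1) vs, vs.foldl max (-1)) := by
    rw [List.foldl_map, ← foldA_eq vs [] (-1), hvs, List.foldl_map]
  -- B's prefix table
  have hP : ((List.range n).map (fun k => ((k : Nat) : Int))).foldl
      (fun (p : List Int) i => p ++ [max (PySem.List.pyGetD p (-1) 0) (PySem.List.pyGetD max_ys i 0)])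
      [(-1 : Int)]
      = (-1) :: pvScan (-1) vs := by
    rw [List.foldl_map]
    have h := foldP_eq vs [] (-1)
    rw [hvs, List.foldl_map] at h
    exact h
  rw [hA, hP]
  apply List.ext_getElem
  · simp [pvDiffs_length, hlen]
  · intro k h1 h2
    have hkn : k < n := by simpa [pvDiffs_length, hlen] using h1
    have hkv : k < vs.length := by omega
    have hgk : ((List.range n).map (fun j => ((j : Nat) : Int)))[k]'(by simpa using hkn)
        = ((k : Nat) : Int) := by simp
    have key := pvScan_diff_getD vs (-1) k hkv
    have h1' : ((k : Int) + 1) = (((k + 1 : Nat)) : Int) := by push_cast; ring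
    simp only [List.getElem_map, List.getElem_range, h1', PySem.List.pyGetD_natCast]
    rw [key]
    have hk2 : k < (pvDiffs (-1) vs).length := by simpa [pvDiffs_length] using hkv
    simp [List.getD_eq_getElem?_getD, List.getElem?_eq_getElem hk2]
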